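-- pv_equiv track=rewrite | github.com/HarisankarRNR/Litcode_CS_Py | Module2/Lab2/Lego_Blocks.py | legoBlocks
-- ===== SOURCE A (Python) =====
-- def legoBlocks(n, m):
--     MOD = 1000000007
--     rowComb = [1, 1, 2, 4]
--
--     while len(rowComb) <= m:
--         rowComb.append(sum(rowComb[-4:]) % MOD)
--
--     total = [pow(c, n, MOD) for c in rowComb]
--     unstable = [0, 0]
--
--     for i in range(2, m + 1):
--         f = lambda j: (total[j] - unstable[j]) * total[i - j]
--         result = sum(map(f, range(1, i)))
--         unstable.append(result % MOD)
--     return (total[m] - unstable[m]) % MOD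
-- ===== SOURCE B (Python) =====
-- def legoBlocks(n, m):
--     MOD = 1000000007
--     rowComb = [1, 1, 2, 4]
--     while len(rowComb) <= m:
--         rowComb.append(sum(rowComb[-4:]) % MOD)
--     total = [pow(c, n, MOD) for c in rowComb]
--     if m == 0:
--         return 1
--     # Every wall factors uniquely into solid walls, so the generating series of
--     # wall counts T(x) and of solid-wall counts S(x) satisfy T = 1/(1 - S),
--     # i.e. S = 1 - 1/T.  Invert T mod x^(m+1) by Newton doubling
--     # (I <- I*(2 - T*I), precision doubles each step) and read off -[x^m] 1/T.
--
--     def polymul(p, q, k):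
--         # product of p and q truncated to k coefficients, mod MOD
--         return [sum(p[i] * q[t - i]
--                     for i in range(max(0, t - len(q) + 1), min(t + 1, len(p)))) % MOD
--                 for t in range(k)]
--
--     def inv_series(k):
--         # inverse of total (constant coefficient 1) mod x^k, for k >= 1
--         if k == 1:
--             return [1]
--         half = inv_series((k + 1) // 2)
--         ti = polymul(total, half, k)
--         corr = [(2 - ti[0]) % MOD] + [(-c) % MOD for c in ti[1:]]
--         return polymul(half, corr, k)
--
--     return (-inv_series(m + 1)[m]) % MOD
-- ===== Notes on version B (the rewrite author's own statement) =====
-- stated objective: alternative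
-- what changed: The O(m^2) triangular gather DP over unstable[] is replaced by a different algorithm: walls factor uniquely into solid walls, so T(x) = 1/(1-S(x)); B computes the power-series inverse of the total-count series by Newton doubling (I <- I*(2 - T*I), precision doubling, with an explicit truncated polynomial multiplication) and returns -[x^m] 1/T.
-- outside the precondition, e.g. on legoBlocks(2, -1): A returns 16, B does not finish within the time limit; on legoBlocks(2, -2): A returns 4, B does not finish within the time limit; on legoBlocks(2, -3): A raises IndexError, B does not finish within the time limit
import Mathlib
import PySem

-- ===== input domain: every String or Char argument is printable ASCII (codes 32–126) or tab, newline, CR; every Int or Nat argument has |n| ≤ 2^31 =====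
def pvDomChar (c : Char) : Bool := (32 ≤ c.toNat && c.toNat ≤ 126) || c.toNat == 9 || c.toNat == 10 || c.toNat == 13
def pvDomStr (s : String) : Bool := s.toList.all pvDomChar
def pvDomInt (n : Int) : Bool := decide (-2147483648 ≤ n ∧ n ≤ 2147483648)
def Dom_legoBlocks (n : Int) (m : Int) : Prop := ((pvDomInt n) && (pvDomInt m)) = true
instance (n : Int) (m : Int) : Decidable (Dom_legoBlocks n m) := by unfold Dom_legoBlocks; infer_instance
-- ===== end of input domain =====

-- B replaces A's O(m^2) triangular DP over unstable[] by a different algorithm: since walls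
-- factor uniquely into solid walls, T(x) = 1/(1 - S(x)), so B inverts the total-count power
-- series by Newton doubling and returns -[x^m] 1/T; objective: alternative.

-- ===== PORT A =====
-- hand port of Python's three-argument pow for e ≥ 0: square-and-multiply, reducing mod M at
-- every step exactly as CPython does (PySem.Int.powMod computes b^e in full, which is not
-- evaluable for input-sized exponents); it computes c^e % M, i.e. PySem.Int.powMod c e M
def powModFast (c : Int) (M : Int) : Nat → Int
  | 0 => PySem.Int.mod 1 M
  | e + 1 =>
    let h := powModFast c M ((e + 1) / 2)
    if (e + 1) % 2 = 0 then PySem.Int.mod (h * h) M else PySem.Int.mod (h * h * c) M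
  decreasing_by exact Nat.div_lt_self (Nat.succ_pos e) (by norm_num)

-- shared port of Python's pow(c, n, MOD): powModFast for n ≥ 0; for n < 0 Python returns
-- pow(modinv(c), -n, MOD), rendered here via Fermat (MOD is prime), exact whenever Python's
-- pow returns (i.e. whenever the inverse exists)
def pyPowMod (c : Int) (n : Int) (MOD : Int) : Int :=
  if n < 0 then powModFast (powModFast c MOD (MOD - 2).toNat) MOD (-n).toNat
  else powModFast c MOD n.toNat

-- the while-loop 'while len(rowComb) <= m: rowComb.append(sum(rowComb[-4:]) % MOD)';
-- it runs exactly (m - 3).toNat times starting from length 4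
def growRow (MOD : Int) : Nat → List Int → List Int
  | 0, xs => xs
  | k + 1, xs => growRow MOD k (xs ++ [PySem.Int.mod (PySem.List.slice xs (some (-4)) none).sum MOD])

def legoBlocks (n : Int) (m : Int) : Int :=
  let MOD : Int := 1000000007
  let rowComb : List Int := growRow MOD (m - 3).toNat [1, 1, 2, 4]
  let total : List Int := rowComb.map (fun c => pyPowMod c n MOD)
  let unstable : List Int :=
    (PySem.List.pyRange 2 (m + 1) 1).foldl (fun u i =>
      let f : Int → Int := fun j =>
        (PySem.List.pyGetD total j 0 - PySem.List.pyGetD u j 0) * PySem.List.pyGetD total (i - j) 0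
      let result : Int := ((PySem.List.pyRange 1 i 1).map f).sum
      u ++ [PySem.Int.mod result MOD]) [0, 0]
  PySem.Int.mod (PySem.List.pyGetD total m 0 - PySem.List.pyGetD unstable m 0) MOD

-- ===== PORT B =====
-- Source B's polymul: the product of p and q truncated to k coefficients, each reduced mod MOD
def polymul (MOD : Int) (p : List Int) (q : List Int) (k : Int) : List Int :=
  (PySem.List.pyRange 0 k 1).map (fun t =>
    PySem.Int.mod (((PySem.List.pyRange (max 0 (t - (q.length : Int) + 1))
        (min (t + 1) (p.length : Int)) 1).map
      (fun i => PySem.List.pyGetD p i 0 * PySem.List.pyGetD q (t - i) 0)).sum) MOD)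

-- Source B's inv_series: inverse of total mod x^k by Newton doubling; Python only calls it with
-- k ≥ 1 (it diverges at k = 0, so the 0-case here is a pure totality guard)
def invSeries (MOD : Int) (total : List Int) : Nat → List Int
  | 0 => []
  | 1 => [1]
  | k + 2 =>
    let half := invSeries MOD total ((k + 2 + 1) / 2)
    let ti := polymul MOD total half ((k : Int) + 2)
    let corr := [PySem.Int.mod (2 - PySem.List.pyGetD ti 0 0) MOD] ++
      (PySem.List.slice ti (some 1) none).map (fun c => PySem.Int.mod (-c) MOD)
    polymul MOD half corr ((k : Int) + 2)
  decreasing_by omega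

def legoBlocks_alt (n : Int) (m : Int) : Int :=
  let MOD : Int := 1000000007
  let rowComb : List Int := growRow MOD (m - 3).toNat [1, 1, 2, 4]
  let total : List Int := rowComb.map (fun c => pyPowMod c n MOD)
  if m = 0 then 1
  else PySem.Int.mod (-(PySem.List.pyGetD (invSeries MOD total (m + 1).toNat) m 0)) MOD

-- ===== PRECONDITION & SPEC =====
-- Pre_ restricts to the natural domain of wall widths: for negative m A either raises
-- IndexError (m ≤ -3) or returns accidental negative-index wraparound values (m = -1, -2),
-- where B's recursion diverges.
def Pre_legoBlocks (n : Int) (m : Int) : Prop := 0 ≤ m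
instance (n : Int) (m : Int) : Decidable (Pre_legoBlocks n m) := by unfold Pre_legoBlocks; infer_instance
def pvWitness_legoBlocks : Int × Int := (3, 4)

def Spec_legoBlocks (n : Int) (m : Int) (out : Int) : Prop := out = legoBlocks_alt n m
instance (n : Int) (m : Int) (out : Int) : Decidable (Spec_legoBlocks n m out) := by unfold Spec_legoBlocks; infer_instance

-- ===== CLAIM (what is proved, stated in full; the proofs are below) =====
def Claim_equal_legoBlocks : Prop := ∀ (n : Int) (m : Int), Dom_legoBlocks n m → Pre_legoBlocks n m → Spec_legoBlocks n m (legoBlocks n m)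

-- ===== LEMMAS AND PROOFS =====

def pvM : Int := 1000000007

lemma hpvM : (0 : Int) < pvM := by norm_num [pvM]

-- ---------- A-side characterisation (unstable / solid values) ----------

-- A's loop body, as a named step function (identical to the fold body inside legoBlocks)
def aStep (T : List Int) (u : List Int) (i : Int) : List Int :=
  u ++ [PySem.Int.mod (((PySem.List.pyRange 1 i 1).map (fun j =>
    (PySem.List.pyGetD T j 0 - PySem.List.pyGetD u j 0) * PySem.List.pyGetD T (i - j) 0)).sum) pvM]

-- the unstable list after the iterations i = 2 .. k+1 of A's loop
def uAux (T : List Int) : Nat → List Int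
  | 0 => [0, 0]
  | k + 1 => aStep T (uAux T k) (2 + (k : Int))

-- the value unstable[i]
def Uv (T : List Int) (i : Nat) : Int := (uAux T i).getD i 0

-- the count of solid walls of width j (reduced mod pvM)
def Sv (T : List Int) (j : Nat) : Int := (T.getD j 0 - Uv T j) % pvM

def totalOf (n m : Int) : List Int :=
  (growRow pvM (m - 3).toNat [1, 1, 2, 4]).map (fun c => pyPowMod c n pvM)

lemma legoA_eq (n m : Int) :
    legoBlocks n m =
      PySem.Int.mod (PySem.List.pyGetD (totalOf n m) m 0 -
        PySem.List.pyGetD ((PySem.List.pyRange 2 (m + 1) 1).foldl (aStep (totalOf n m)) [0, 0]) m 0) pvM := rfl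

lemma aFold (T : List Int) : ∀ t : Nat,
    (PySem.List.pyRange 2 (2 + (t : Int)) 1).foldl (aStep T) [0, 0] = uAux T t := by
  intro t
  induction t with
  | zero => rw [PySem.List.pyRange_one_eq_nil (by norm_num)]; rfl
  | succ k ih =>
      have h : (2 + ((k + 1 : Nat) : Int)) = (2 + (k : Int)) + 1 := by push_cast; ring
      rw [h, PySem.List.pyRange_one_succ_right (by omega), List.foldl_append, ih]
      rfl

lemma uAux_length (T : List Int) : ∀ k, (uAux T k).length = k + 2 := by
  intro k
  induction k with
  | zero => rfl
  | succ k ih => simp [uAux, aStep, ih]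

lemma uAux_getD (T : List Int) : ∀ k j, j ≤ k + 1 → (uAux T k).getD j 0 = Uv T j := by
  intro k
  induction k with
  | zero =>
      intro j hj
      interval_cases j
      · rfl
      · show (0:Int) = (uAux T 1).getD 1 0
        simp [uAux, aStep, List.getD]
  | succ k ih =>
      intro j hj
      rcases Nat.lt_or_ge j (k + 2) with h | h
      · have : (uAux T (k+1)).getD j 0 = (uAux T k).getD j 0 := by
          show (aStep T (uAux T k) _).getD j 0 = _
          unfold aStep
          exact List.getD_append _ _ _ _ (by rw [uAux_length]; omega)
        rw [this, ih j (by omega)]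
      · have hj2 : j = k + 2 := by omega
        subst hj2
        show _ = (uAux T (k+2)).getD (k+2) 0
        have : (uAux T (k+2)).getD (k+2) 0 = (uAux T (k+1)).getD (k+2) 0 := by
          show (aStep T (uAux T (k+1)) _).getD (k+2) 0 = _
          unfold aStep
          exact List.getD_append _ _ _ _ (by rw [uAux_length]; omega)
        rw [this]

lemma Uv_one (T : List Int) : Uv T 1 = 0 := by
  simp [Uv, uAux, aStep, List.getD]

lemma Uv_eq (T : List Int) (k : Nat) :
    Uv T (k + 2) = (((List.range (k + 1)).map (fun t =>
      (T.getD (1 + t) 0 - Uv T (1 + t)) * T.getD (k + 1 - t) 0)).sum) % pvM := by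
  show (uAux T (k + 2)).getD (k + 2) 0 = _
  have h1 : (uAux T (k + 2)).getD (k + 2) 0 = (uAux T (k + 1)).getD (k + 2) 0 := by
    show (aStep T (uAux T (k + 1)) _).getD (k + 2) 0 = _
    unfold aStep
    exact List.getD_append _ _ _ _ (by rw [uAux_length]; omega)
  rw [h1]
  show (aStep T (uAux T k) (2 + (k : Int))).getD (k + 2) 0 = _
  unfold aStep
  rw [List.getD_append_right _ _ _ _ (by rw [uAux_length])]
  rw [uAux_length]
  simp only [Nat.sub_self, List.getD_cons_zero]
  rw [PySem.Int.mod_eq_emod_of_pos hpvM]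
  congr 1
  rw [PySem.List.pyRange_one]
  have hb : ((2 + (k : Int)) - 1).toNat = k + 1 := by omega
  rw [hb, List.map_map]
  congr 1
  apply List.map_congr_left
  intro t ht
  have ht' : t ≤ k := by simpa using Nat.lt_succ_iff.mp (List.mem_range.mp ht)
  simp only [Function.comp]
  have e1 : (1 : Int) + (t : Int) = ((1 + t : Nat) : Int) := by push_cast; ring
  have e2 : (2 + (k : Int)) - (((1 + t : Nat)) : Int) = ((k + 1 - t : Nat) : Int) := by omega
  rw [e1, e2, PySem.List.pyGetD_natCast, PySem.List.pyGetD_natCast, PySem.List.pyGetD_natCast,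
    uAux_getD T k (1 + t) (by omega)]

lemma Uv_modeq (T : List Int) (k : Nat) :
    Int.ModEq pvM (Uv T (k + 1))
      (((List.range k).map (fun t =>
        (T.getD (1 + t) 0 - Uv T (1 + t)) * T.getD (k - t) 0)).sum) := by
  cases k with
  | zero => rw [Uv_one]; rfl
  | succ k => rw [Uv_eq]; exact Int.emod_emod_of_dvd _ dvd_rfl

-- ---------- casts into ZMod ----------

abbrev pvZ := ZMod 1000000007

lemma cast_emod (a : Int) : (((a % pvM : Int)) : pvZ) = (a : pvZ) := by
  have h : pvM = ((1000000007 : ℕ) : Int) := by norm_num [pvM]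
  rw [h, ZMod.intCast_mod]

lemma cast_pymod (a : Int) : ((PySem.Int.mod a pvM : Int) : pvZ) = (a : pvZ) := by
  rw [PySem.Int.mod_eq_emod_of_pos hpvM, cast_emod]

lemma cast_modeq {a b : Int} (h : Int.ModEq pvM a b) : ((a : Int) : pvZ) = (b : pvZ) := by
  have h1 : (a : pvZ) = ((a % pvM : Int) : pvZ) := (cast_emod a).symm
  have h2 : (b : pvZ) = ((b % pvM : Int) : pvZ) := (cast_emod b).symm
  rw [h1, h2, h]

-- coefficient j of a list, as an element of ZMod p (indices past the end give 0)
def lc (xs : List Int) (i : ℕ) : pvZ := ((xs.getD i 0 : Int) : pvZ)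

-- the power series with the list's coefficients
def ser (xs : List Int) : PowerSeries pvZ := PowerSeries.mk (lc xs)

lemma listRangeSum (N : ℕ) (f : ℕ → Int) :
    ((List.range N).map f).sum = ∑ i ∈ Finset.range N, f i := by
  induction N with
  | zero => simp
  | succ n ih => simp [List.range_succ, Finset.sum_range_succ, ih]

lemma pyRangeMapSum (N : ℕ) (g : Int → Int) :
    ((PySem.List.pyRange 0 (N : Int) 1).map g).sum = ∑ i ∈ Finset.range N, g (i : Int) := by
  induction N with
  | zero => rw [PySem.List.pyRange_one_eq_nil (by norm_num)]; simp
  | succ n ih =>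
      rw [show ((n + 1 : ℕ) : Int) = (n : Int) + 1 by push_cast; ring,
        PySem.List.pyRange_one_succ_right (by positivity), List.map_append, List.sum_append, ih,
        Finset.sum_range_succ]
      simp

-- a window sum equals the full-range sum when the function vanishes outside the window
lemma window_eq_full (g : Int → Int) (lo hi N : Int) (h0 : 0 ≤ lo) (hhiN : hi ≤ N)
    (hloN : lo ≤ N)
    (hzlo : ∀ i : Int, 0 ≤ i → i < lo → g i = 0)
    (hzhi : ∀ i : Int, hi ≤ i → i < N → g i = 0) :
    ((PySem.List.pyRange lo hi 1).map g).sum = ((PySem.List.pyRange 0 N 1).map g).sum := by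
  by_cases hlh : lo ≤ hi
  · rw [PySem.List.pyRange_one_append 0 lo N h0 hloN,
      PySem.List.pyRange_one_append lo hi N hlh hhiN,
      List.map_append, List.map_append, List.sum_append, List.sum_append]
    have z1 : ((PySem.List.pyRange 0 lo 1).map g).sum = 0 := by
      apply List.sum_eq_zero
      intro x hx
      obtain ⟨i, hi, rfl⟩ := List.mem_map.mp hx
      obtain ⟨hi1, hi2⟩ := (PySem.List.mem_pyRange_one).mp hi
      exact hzlo i hi1 hi2
    have z3 : ((PySem.List.pyRange hi N 1).map g).sum = 0 := by
      apply List.sum_eq_zero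
      intro x hx
      obtain ⟨i, hi', rfl⟩ := List.mem_map.mp hx
      obtain ⟨hi1, hi2⟩ := (PySem.List.mem_pyRange_one).mp hi'
      exact hzhi i hi1 hi2
    rw [z1, z3]
    ring
  · rw [PySem.List.pyRange_one_eq_nil (by omega)]
    symm
    apply List.sum_eq_zero
    intro x hx
    obtain ⟨i, hi', rfl⟩ := List.mem_map.mp hx
    obtain ⟨hi1, hi2⟩ := (PySem.List.mem_pyRange_one).mp hi'
    by_cases hc : i < lo
    · exact hzlo i hi1 hc
    · exact hzhi i (by omega) hi2

lemma polymul_length (MOD : Int) (p q : List Int) (k : Int) :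
    (polymul MOD p q k).length = k.toNat := by
  simp [polymul, PySem.List.length_pyRange_one]

lemma polymul_coeff (p q : List Int) (k : Int) (t : ℕ) (ht : (t : Int) < k) :
    lc (polymul pvM p q k) t = PowerSeries.coeff (R := pvZ) t (ser p * ser q) := by
  have hk : k = ((k.toNat : ℕ) : Int) := by omega
  unfold lc polymul
  rw [← PySem.List.pyGetD_natCast, hk,
    PySem.List.pyGetD_map_pyRange _ k.toNat t 0 (by omega)]
  rw [cast_pymod]
  -- replace the window sum by the full sum over 0..t
  rw [window_eq_full _ _ _ ((t : Int) + 1) (le_max_left _ _) (min_le_left _ _)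
    (by omega)
    (by
      intro i hi1 hi2
      have hq : (q.length : Int) ≤ (t : Int) - i := by omega
      have : PySem.List.pyGetD q ((t : Int) - i) 0 = 0 := by
        have he : (t : Int) - i = (((t : Int) - i).toNat : Int) := by omega
        rw [he, PySem.List.pyGetD_natCast]
        exact List.getD_eq_default _ _ (by omega)
      rw [this, mul_zero])
    (by
      intro i hi1 hi2
      have hp : (p.length : Int) ≤ i := by omega
      have : PySem.List.pyGetD p i 0 = 0 := by
        have he : i = ((i.toNat : ℕ) : Int) := by omega
        rw [he, PySem.List.pyGetD_natCast]
        exact List.getD_eq_default _ _ (by omega)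
      rw [this, zero_mul])]
  rw [show ((t : Int) + 1) = (((t + 1 : ℕ) : ℕ) : Int) by push_cast; ring, pyRangeMapSum]
  rw [PowerSeries.coeff_mul, Finset.Nat.sum_antidiagonal_eq_sum_range_succ_mk]
  push_cast
  apply Finset.sum_congr rfl
  intro i hi
  have hit : i ≤ t := Nat.lt_succ_iff.mp (Finset.mem_range.mp hi)
  have e2 : ((t : Int) - (i : Int)) = (((t - i : ℕ) : ℕ) : Int) := by omega
  rw [PySem.List.pyGetD_natCast, e2, PySem.List.pyGetD_natCast]
  simp [ser, lc, PowerSeries.coeff_mk]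

-- ---------- the Newton iteration invariant ----------

lemma invSeries_one (MOD : Int) (T : List Int) : invSeries MOD T 1 = [1] := by
  rw [invSeries]

lemma invSeries_two (MOD : Int) (T : List Int) (k : Nat) :
    invSeries MOD T (k + 2) =
      (let half := invSeries MOD T ((k + 2 + 1) / 2)
       let ti := polymul MOD T half ((k : Int) + 2)
       let corr := [PySem.Int.mod (2 - PySem.List.pyGetD ti 0 0) MOD] ++
         (PySem.List.slice ti (some 1) none).map (fun c => PySem.Int.mod (-c) MOD)
       polymul MOD half corr ((k : Int) + 2)) := by
  rw [invSeries]

lemma coeff_sum_range (φ ψ : PowerSeries pvZ) (t : ℕ) :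
    PowerSeries.coeff (R := pvZ) t (φ * ψ) =
      ∑ i ∈ Finset.range (t + 1),
        PowerSeries.coeff (R := pvZ) i φ * PowerSeries.coeff (R := pvZ) (t - i) ψ := by
  rw [PowerSeries.coeff_mul, Finset.Nat.sum_antidiagonal_eq_sum_range_succ_mk]

lemma newton (T : List Int) (hT0 : lc T 0 = 1) :
    ∀ k, 1 ≤ k → ∀ t, t < k →
      PowerSeries.coeff (R := pvZ) t (ser T * ser (invSeries pvM T k)) =
        if t = 0 then 1 else 0 := by
  intro k
  induction k using Nat.strong_induction_on with
  | _ k ih =>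
    match k with
    | 0 => intro h; omega
    | 1 =>
        intro _ t ht
        have ht0 : t = 0 := by omega
        subst ht0
        rw [coeff_sum_range, invSeries_one]
        have h := hT0
        simp only [lc, List.getD] at h
        simp [ser, lc, PowerSeries.coeff_mk, List.getD, h]
    | (k + 2) =>
        intro _ t ht
        set s : ℕ := (k + 2 + 1) / 2 with hs
        have hs1 : 1 ≤ s := by omega
        have hslt : s < k + 2 := by omega
        have hs2 : k + 2 ≤ 2 * s := by omega
        set H : List Int := invSeries pvM T s with hH
        have hHmul : ∀ u, u < s →
            PowerSeries.coeff (R := pvZ) u (ser T * ser H) = if u = 0 then 1 else 0 :=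
          fun u hu => ih s hslt hs1 u hu
        set E : PowerSeries pvZ := 1 - ser T * ser H with hEdef
        have hE : ∀ u, u < s → PowerSeries.coeff (R := pvZ) u E = 0 := by
          intro u hu
          rw [hEdef, map_sub, PowerSeries.coeff_one, hHmul u hu]
          split_ifs <;> ring
        -- unfold one Newton step
        show PowerSeries.coeff (R := pvZ) t (ser T * ser (invSeries pvM T (k + 2))) = _
        rw [invSeries_two]
        simp only []
        set ti : List Int := polymul pvM T (invSeries pvM T ((k + 2 + 1) / 2)) ((k : Int) + 2) with hti
        have htiH : ti = polymul pvM T H ((k : Int) + 2) := by rw [hti, hH, hs]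
        set corr : List Int := [PySem.Int.mod (2 - PySem.List.pyGetD ti 0 0) pvM] ++
          (PySem.List.slice ti (some 1) none).map (fun c => PySem.Int.mod (-c) pvM) with hcorr
        have hti_len : ti.length = k + 2 := by rw [htiH, polymul_length]; omega
        have hti_c : ∀ u, u < k + 2 →
            lc ti u = PowerSeries.coeff (R := pvZ) u (ser T * ser H) := by
          intro u hu
          rw [htiH]
          exact polymul_coeff T H ((k : Int) + 2) u (by omega)
        -- coefficients of corr agree with those of 1 + E below k + 2
        have hcorr_c : ∀ u, u < k + 2 →
            ((corr.getD u 0 : Int) : pvZ) = PowerSeries.coeff (R := pvZ) u (1 + E) := by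
          intro u hu
          match u with
          | 0 =>
              have : corr.getD 0 0 = PySem.Int.mod (2 - PySem.List.pyGetD ti 0 0) pvM := rfl
              rw [this, cast_pymod, PySem.List.pyGetD_zero]
              rw [map_add, PowerSeries.coeff_one, hEdef, map_sub, PowerSeries.coeff_one]
              have := hti_c 0 (by omega)
              rw [lc] at this
              push_cast
              rw [this]
              simp
              ring
          | v + 1 =>
              have h1 : corr.getD (v + 1) 0 =
                  ((PySem.List.slice ti (some 1) none).map
                    (fun c => PySem.Int.mod (-c) pvM)).getD v 0 := rfl
              rw [h1, PySem.List.slice_from_one]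
              have hv : v < ti.tail.length := by
                rw [List.length_tail, hti_len]; omega
              rw [List.getD_eq_getElem _ _ (by rw [List.length_map]; exact hv)]
              rw [List.getElem_map]
              have h2 : ti.tail[v] = ti[v + 1]'(by rw [hti_len]; omega) := by
                rw [List.getElem_tail]
              rw [h2, cast_pymod]
              have h3 : ti[v + 1]'(by rw [hti_len]; omega) = ti.getD (v + 1) 0 :=
                (List.getD_eq_getElem _ _ (by rw [hti_len]; omega)).symm
              push_cast [h3]
              have := hti_c (v + 1) hu
              rw [lc] at this
              rw [this]
              rw [map_add, PowerSeries.coeff_one, hEdef, map_sub, PowerSeries.coeff_one]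
              simp
        -- coefficients of the new approximation
        have hI_c : ∀ u, u < k + 2 →
            lc (polymul pvM H corr ((k : Int) + 2)) u =
              PowerSeries.coeff (R := pvZ) u (ser H * (1 + E)) := by
          intro u hu
          rw [polymul_coeff H corr ((k : Int) + 2) u (by omega)]
          rw [coeff_sum_range, coeff_sum_range]
          apply Finset.sum_congr rfl
          intro i hi
          have : PowerSeries.coeff (R := pvZ) (u - i) (ser corr) =
              PowerSeries.coeff (R := pvZ) (u - i) (1 + E) := by
            rw [ser, PowerSeries.coeff_mk]
            exact hcorr_c (u - i) (by omega)
          rw [this]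
        -- finish: coeff t (T * I) = coeff t (T * (H * (1+E))) = coeff t (1 - E^2) = δ
        rw [coeff_sum_range]
        have step1 : ∀ i ∈ Finset.range (t + 1),
            PowerSeries.coeff (R := pvZ) i (ser T) *
              PowerSeries.coeff (R := pvZ) (t - i) (ser (polymul pvM H corr ((k : Int) + 2))) =
            PowerSeries.coeff (R := pvZ) i (ser T) *
              PowerSeries.coeff (R := pvZ) (t - i) (ser H * (1 + E)) := by
          intro i _
          congr 1
          rw [ser, PowerSeries.coeff_mk]
          exact hI_c (t - i) (by omega)
        rw [Finset.sum_congr rfl step1, ← coeff_sum_range]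
        have key : ser T * (ser H * (1 + E)) = 1 - E ^ 2 := by
          rw [hEdef]; ring
        rw [key, map_sub, PowerSeries.coeff_one]
        have hE2 : PowerSeries.coeff (R := pvZ) t (E ^ 2) = 0 := by
          rw [sq, PowerSeries.coeff_mul]
          apply Finset.sum_eq_zero
          intro x hx
          have hxy : x.1 + x.2 = t := Finset.mem_antidiagonal.mp hx
          rcases Nat.lt_or_ge x.1 s with hx1 | hx1
          · rw [hE x.1 hx1, zero_mul]
          · rw [hE x.2 (by omega), mul_zero]
        rw [hE2, sub_zero]

-- ---------- A's values form the inverse series too ----------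

-- the series 1 - S(x) built from A's solid counts
def Dz (T : List Int) (j : ℕ) : pvZ := if j = 0 then 1 else -(((Sv T j : Int) : pvZ))

lemma sv_cast (T : List Int) (j : ℕ) :
    ((Sv T j : Int) : pvZ) = lc T j - ((Uv T j : Int) : pvZ) := by
  rw [Sv, cast_emod, lc]
  push_cast
  ring

lemma Dz_inv (T : List Int) (hT0 : lc T 0 = 1) :
    ∀ t, ∑ i ∈ Finset.range (t + 1), lc T i * Dz T (t - i) = if t = 0 then 1 else 0 := by
  intro t
  match t with
  | 0 => simp [Dz, hT0]
  | K + 1 =>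
      have hu : ((Uv T (K + 1) : Int) : pvZ) =
          ∑ i ∈ Finset.range K, ((Sv T (1 + i) : Int) : pvZ) * lc T (K - i) := by
        have h1 := cast_modeq (Uv_modeq T K)
        rw [h1, listRangeSum]
        push_cast
        apply Finset.sum_congr rfl
        intro i _
        rw [sv_cast, lc, lc]
      rw [Finset.sum_range_succ']
      have hf0 : lc T 0 * Dz T (K + 1 - 0) = -((Sv T (K + 1) : Int) : pvZ) := by
        rw [hT0, one_mul, Dz, if_neg (by omega)]
        norm_num
      rw [hf0]
      rw [Finset.sum_range_succ]
      have htop : lc T (K + 1) * Dz T (K + 1 - (K + 1)) = lc T (K + 1) := by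
        simp [Dz]
      rw [htop]
      have hmid : ∑ i ∈ Finset.range K, lc T (i + 1) * Dz T (K + 1 - (i + 1)) =
          -∑ i ∈ Finset.range K, lc T (i + 1) * ((Sv T (K - i) : Int) : pvZ) := by
        rw [← Finset.sum_neg_distrib]
        apply Finset.sum_congr rfl
        intro i hi
        have hik : i < K := Finset.mem_range.mp hi
        have he : K + 1 - (i + 1) = K - i := by omega
        rw [he, Dz, if_neg (by omega)]
        ring
      rw [hmid]
      have hrefl : ∑ i ∈ Finset.range K, lc T (i + 1) * ((Sv T (K - i) : Int) : pvZ) =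
          ((Uv T (K + 1) : Int) : pvZ) := by
        rw [hu]
        rw [← Finset.sum_range_reflect (fun i => ((Sv T (1 + i) : Int) : pvZ) * lc T (K - i)) K]
        apply Finset.sum_congr rfl
        intro i hi
        have hik : i < K := Finset.mem_range.mp hi
        have e1 : 1 + (K - 1 - i) = K - i := by omega
        have e2 : K - (K - 1 - i) = i + 1 := by omega
        rw [e1, e2]
        ring
      rw [hrefl, sv_cast, if_neg (by omega : ¬ K + 1 = 0)]
      ring

-- ---------- uniqueness of the inverse series ----------

lemma pvInvUnique (Tz D I : ℕ → pvZ) (hT0 : Tz 0 = 1) (K : ℕ)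
    (hD : ∀ t, t < K → ∑ i ∈ Finset.range (t + 1), Tz i * D (t - i) = if t = 0 then 1 else 0)
    (hI : ∀ t, t < K → ∑ i ∈ Finset.range (t + 1), Tz i * I (t - i) = if t = 0 then 1 else 0) :
    ∀ t, t < K → D t = I t := by
  intro t
  induction t using Nat.strong_induction_on with
  | _ t ih =>
    intro htK
    have h1 := hD t htK
    have h2 := hI t htK
    rw [Finset.sum_range_succ'] at h1 h2
    have hsum : ∑ i ∈ Finset.range t, Tz (i + 1) * D (t - (i + 1)) =
        ∑ i ∈ Finset.range t, Tz (i + 1) * I (t - (i + 1)) := by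
      apply Finset.sum_congr rfl
      intro i hi
      have hit : i < t := Finset.mem_range.mp hi
      rw [ih (t - (i + 1)) (by omega) (by omega)]
    rw [hsum] at h1
    have h3 := h1.trans h2.symm
    simpa [hT0] using h3

-- ---------- heads of the lists ----------

lemma powModFast_one (M : Int) (hM : (1 : Int) < M) : ∀ e : Nat, powModFast 1 M e = 1 := by
  intro e
  induction e using Nat.strong_induction_on with
  | _ e ih =>
    match e with
    | 0 =>
        rw [powModFast, PySem.Int.mod_eq_emod_of_pos (by omega)]
        exact Int.emod_eq_of_lt (by norm_num) hM
    | e + 1 =>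
        rw [powModFast]
        have hh : powModFast 1 M ((e + 1) / 2) = 1 :=
          ih ((e + 1) / 2) (Nat.div_lt_self (Nat.succ_pos e) (by norm_num))
        rw [hh]
        have hm1 : PySem.Int.mod 1 M = 1 := by
          rw [PySem.Int.mod_eq_emod_of_pos (by omega)]
          exact Int.emod_eq_of_lt (by norm_num) hM
        split_ifs <;> simpa using hm1

lemma pyPowMod_one (n : Int) : pyPowMod 1 n pvM = 1 := by
  unfold pyPowMod
  have h := powModFast_one pvM (by norm_num [pvM])
  split_ifs <;> simp [h]

lemma growRow_cons (M : Int) : ∀ (k : Nat) (x : Int) (xs : List Int),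
    ∃ ys, growRow M k (x :: xs) = x :: ys := by
  intro k
  induction k with
  | zero => exact fun x xs => ⟨xs, rfl⟩
  | succ k ih =>
      intro x xs
      show ∃ ys, growRow M k ((x :: xs) ++ _) = x :: ys
      rw [List.cons_append]
      exact ih x _

lemma totalOf_head (n m : Int) : (totalOf n m).getD 0 0 = 1 := by
  unfold totalOf
  obtain ⟨ys, hys⟩ := growRow_cons pvM (m - 3).toNat 1 [1, 2, 4]
  rw [hys, List.map_cons, List.getD_cons_zero, pyPowMod_one]

-- ---------- final assembly ----------

lemma bounds_mod (a : Int) : 0 ≤ a % pvM ∧ a % pvM < pvM :=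
  ⟨Int.emod_nonneg a (by norm_num [pvM]), Int.emod_lt_of_pos a hpvM⟩

lemma cast_inj_of_bounds (a b : Int) (ha : 0 ≤ a ∧ a < pvM) (hb : 0 ≤ b ∧ b < pvM)
    (h : ((a : Int) : pvZ) = (b : pvZ)) : a = b := by
  have h2 : a ≡ b [ZMOD (1000000007 : ℕ)] := (ZMod.intCast_eq_intCast_iff a b _).mp h
  have h3 : a % 1000000007 = b % 1000000007 := h2
  have hM : pvM = 1000000007 := rfl
  rw [hM] at ha hb
  omega

lemma legoMain (n m : Int) (hm : 0 ≤ m) : legoBlocks n m = legoBlocks_alt n m := by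
  by_cases hm0 : m = 0
  · subst hm0
    rw [legoA_eq]
    have hB : legoBlocks_alt n 0 = 1 := by simp [legoBlocks_alt]
    rw [hB]
    rw [PySem.List.pyRange_one_eq_nil (by norm_num)]
    show PySem.Int.mod (PySem.List.pyGetD (totalOf n 0) 0 0 - PySem.List.pyGetD [0, 0] 0 0) pvM = 1
    rw [PySem.List.pyGetD_zero, PySem.List.pyGetD_zero, totalOf_head]
    show PySem.Int.mod (1 - 0) pvM = 1
    rw [PySem.Int.mod_eq_emod_of_pos hpvM]
    norm_num [pvM]
  · -- m ≥ 1
    obtain ⟨M, rfl⟩ : ∃ M : Nat, m = ((M : ℕ) : Int) := ⟨m.toNat, by omega⟩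
    have hM1 : 1 ≤ M := by omega
    set T : List Int := totalOf n (M : Int) with hT
    -- A's value
    have hrA : PySem.List.pyRange 2 ((M : Int) + 1) 1 =
        PySem.List.pyRange 2 (2 + ((((M : Int) - 1).toNat : ℕ) : Int)) 1 := by
      congr 1; omega
    have hA : legoBlocks n (M : Int) = Sv T M := by
      rw [legoA_eq, hrA, aFold, PySem.List.pyGetD_natCast, PySem.List.pyGetD_natCast,
        uAux_getD T _ M (by omega), Sv, PySem.Int.mod_eq_emod_of_pos hpvM]
    -- B's value
    set I : List Int := invSeries pvM T (M + 1) with hI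
    have hB : legoBlocks_alt n (M : Int) = PySem.Int.mod (-(I.getD M 0)) pvM := by
      show (if (M : Int) = 0 then (1 : Int)
        else PySem.Int.mod (-(PySem.List.pyGetD (invSeries 1000000007 T ((M : Int) + 1).toNat) (M : Int) 0)) 1000000007) = _
      rw [if_neg (by omega)]
      have e1 : ((M : Int) + 1).toNat = M + 1 := by omega
      have e2 : (1000000007 : Int) = pvM := rfl
      rw [e1, e2, PySem.List.pyGetD_natCast]
    -- the two casts agree
    have hT0 : lc T 0 = 1 := by rw [lc, totalOf_head]; norm_num
    have hIr : ∀ t, t < M + 1 →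
        ∑ i ∈ Finset.range (t + 1), lc T i * lc I (t - i) = if t = 0 then 1 else 0 := by
      intro t ht
      have h := newton T hT0 (M + 1) (by omega) t ht
      rw [coeff_sum_range] at h
      simpa [ser, PowerSeries.coeff_mk] using h
    have hDr : ∀ t, t < M + 1 →
        ∑ i ∈ Finset.range (t + 1), lc T i * Dz T (t - i) = if t = 0 then 1 else 0 :=
      fun t _ => Dz_inv T hT0 t
    have huniq : Dz T M = lc I M := pvInvUnique (lc T) (Dz T) (lc I) hT0 (M + 1) hDr hIr M (by omega)
    have hcast : ((Sv T M : Int) : pvZ) = ((PySem.Int.mod (-(I.getD M 0)) pvM : Int) : pvZ) := by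
      rw [cast_pymod]
      have h1 : Dz T M = -((Sv T M : Int) : pvZ) := by rw [Dz, if_neg (by omega)]
      have h2 : lc I M = ((I.getD M 0 : Int) : pvZ) := rfl
      rw [h1, h2] at huniq
      push_cast
      linear_combination -huniq
    -- both values are reduced residues
    have hbA : 0 ≤ Sv T M ∧ Sv T M < pvM := bounds_mod _
    have hbB : 0 ≤ PySem.Int.mod (-(I.getD M 0)) pvM ∧ PySem.Int.mod (-(I.getD M 0)) pvM < pvM := by
      rw [PySem.Int.mod_eq_emod_of_pos hpvM]; exact bounds_mod _
    rw [hA, hB]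
    exact cast_inj_of_bounds _ _ hbA hbB hcast

-- ===== VERDICT (by name: the statement is the Claim_ definition above) =====
theorem legoBlocks_spec : Claim_equal_legoBlocks := by
  intro n m _ hpre
  exact legoMain n m hpre
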